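-- pv_equiv track=rewrite | github.com/fxkevis/supset-aitz | ai_browser_agent/handlers/email_task_handler.py | _parse_email_task
-- ===== SOURCE A (Python) =====
-- from typing import Dict, List, Optional, Any, Tuple
--
-- def _parse_email_task(description: str) -> Tuple[str, Dict[str, Any]]:
--     """Parse email task description to determine task type and parameters."""
--     description_lower = description.lower()
--
--     if any(keyword in description_lower for keyword in ["spam", "junk", "unwanted"]):
--         return "spam_detection", {"action": "detect_and_handle"}
--
--     if any(keyword in description_lower for keyword in ["organize", "sort", "folder"]):
--         return "email_organization", {"action": "organize"}
--
--     if any(keyword in description_lower for keyword in ["clean", "delete", "remove"]):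
--         return "inbox_cleanup", {"action": "cleanup"}
--
--     return "general", {"action": "analyze"}
-- ===== SOURCE B (Python) =====
-- # B: one left-to-right scan over the suffixes of the lowered text, keeping the
-- # minimum (highest-priority) rule index of any keyword that starts at the current
-- # position; A instead runs per-keyword substring membership tests in an if-chain.
-- _KEYWORD_RULE = {
--     "spam": 0, "junk": 0, "unwanted": 0,
--     "organize": 1, "sort": 1, "folder": 1,
--     "clean": 2, "delete": 2, "remove": 2,
-- }
-- _RESULTS = [
--     ("spam_detection", {"action": "detect_and_handle"}),
--     ("email_organization", {"action": "organize"}),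
--     ("inbox_cleanup", {"action": "cleanup"}),
--     ("general", {"action": "analyze"}),
-- ]
--
-- def _parse_email_task(description: str):
--     s = description.lower()
--     best = 3
--     while s:
--         for kw, r in _KEYWORD_RULE.items():
--             if r < best and s.startswith(kw):
--                 best = r
--         s = s[1:]
--     name, params = _RESULTS[best]
--     return name, dict(params)
-- ===== Notes on version B (the rewrite author's own statement) =====
-- stated objective: alternative
-- what changed: Instead of A's if-chain of per-keyword substring membership tests, B makes a single left-to-right scan over the suffixes of the lowered text, maintaining the minimum rule index of any keyword starting at the current position, and indexes a result table with it.
import Mathlib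
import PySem

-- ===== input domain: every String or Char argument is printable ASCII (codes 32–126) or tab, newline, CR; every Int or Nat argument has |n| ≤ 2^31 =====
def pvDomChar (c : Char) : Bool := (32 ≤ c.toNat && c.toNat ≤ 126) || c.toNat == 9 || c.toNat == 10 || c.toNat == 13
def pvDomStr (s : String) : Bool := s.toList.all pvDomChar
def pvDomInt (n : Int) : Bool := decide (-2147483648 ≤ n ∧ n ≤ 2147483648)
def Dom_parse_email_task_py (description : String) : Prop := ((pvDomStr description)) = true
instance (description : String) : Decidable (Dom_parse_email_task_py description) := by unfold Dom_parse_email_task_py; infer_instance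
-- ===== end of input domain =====

-- B: single left-to-right scan over the suffixes of the lowered text keeping the minimum matched rule index, instead of A's if-chain of substring tests; alternative structure, same behaviour.


-- ===== PORT A =====
def parse_email_task_py (description : String) : String × (List (String × String)) :=
  let description_lower := PySem.Str.lower description
  if ["spam", "junk", "unwanted"].any (fun k => PySem.Str.isIn k description_lower) then
    ("spam_detection", [("action", "detect_and_handle")])
  else if ["organize", "sort", "folder"].any (fun k => PySem.Str.isIn k description_lower) then
    ("email_organization", [("action", "organize")])
  else if ["clean", "delete", "remove"].any (fun k => PySem.Str.isIn k description_lower) then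
    ("inbox_cleanup", [("action", "cleanup")])
  else
    ("general", [("action", "analyze")])

-- ===== PORT B =====
def pvKeywordRule : List (String × Nat) :=
  [("spam", 0), ("junk", 0), ("unwanted", 0),
   ("organize", 1), ("sort", 1), ("folder", 1),
   ("clean", 2), ("delete", 2), ("remove", 2)]

def pvResults : List (String × List (String × String)) :=
  [("spam_detection", [("action", "detect_and_handle")]),
   ("email_organization", [("action", "organize")]),
   ("inbox_cleanup", [("action", "cleanup")]),
   ("general", [("action", "analyze")])]

-- the while-loop over non-empty suffixes of s, ported as structural recursion
def pvBest : List Char → Nat → Nat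
  | [], best => best
  | c :: t, best =>
    pvBest t (pvKeywordRule.foldl
      (fun b kr => if kr.2 < b ∧ PySem.Chars.startswith (c :: t) kr.1.toList = true then kr.2 else b) best)

def parse_email_task_py_alt (description : String) : String × (List (String × String)) :=
  let s := PySem.Str.lower description
  let best := pvBest s.toList 3
  pvResults.getD best ("", [])

-- ===== PRECONDITION & SPEC =====
def Spec_parse_email_task_py (description : String) (out : String × (List (String × String))) : Prop := out = parse_email_task_py_alt description
instance (description : String) (out : String × (List (String × String))) : Decidable (Spec_parse_email_task_py description out) := by unfold Spec_parse_email_task_py; infer_instance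

-- ===== CLAIM (what is proved, stated in full; the proofs are below) =====
def Claim_equal_parse_email_task_py : Prop := ∀ (description : String), Dom_parse_email_task_py description → Spec_parse_email_task_py description (parse_email_task_py description)

-- ===== LEMMAS AND PROOFS =====

-- grouped "some keyword starts here" / "some keyword occurs" tests
def pvP (g : List String) (s : List Char) : Bool := g.any (fun k => PySem.Chars.startswith s k.toList)
def pvQ (g : List String) (s : List Char) : Bool := g.any (fun k => PySem.Chars.isIn k.toList s)

def pvG0 : List String := ["spam", "junk", "unwanted"]
def pvG1 : List String := ["organize", "sort", "folder"]
def pvG2 : List String := ["clean", "delete", "remove"]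

lemma pvIsIn_cons (kw : List Char) (c : Char) (t : List Char) :
    PySem.Chars.isIn kw (c :: t) = (PySem.Chars.startswith (c :: t) kw || PySem.Chars.isIn kw t) := by
  rw [Bool.eq_iff_iff, PySem.Chars.isIn_iff_infix, Bool.or_eq_true,
    PySem.Chars.isIn_iff_infix, PySem.Chars.startswith_iff, List.infix_cons_iff]

-- one keyword group (all entries carry the same rule index r): the fold is "min with r if any match"
lemma pvGroup_step (s : List Char) (r : Nat) : ∀ (ks : List String) (b : Nat),
    ((ks.map (fun k => (k, r))).foldl
      (fun b kr => if kr.2 < b ∧ PySem.Chars.startswith s kr.1.toList = true then kr.2 else b) b) =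
    if r < b ∧ pvP ks s then r else b := by
  intro ks
  induction ks with
  | nil => intro b; simp [pvP]
  | cons k ks ih =>
    intro b
    simp only [List.map_cons, List.foldl_cons, pvP, List.any_cons, Bool.or_eq_true] at *
    rw [ih]
    by_cases h : PySem.Chars.startswith s k.toList = true <;>
      simp only [h] <;> split_ifs <;> first | rfl | omega | tauto

lemma pvKeywordRule_eq : pvKeywordRule =
    (pvG0.map (fun k => (k, 0))) ++ (pvG1.map (fun k => (k, 1))) ++ (pvG2.map (fun k => (k, 2))) := rfl

lemma pvStep_eq (c : Char) (t : List Char) (b : Nat) :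
    pvKeywordRule.foldl
      (fun b kr => if kr.2 < b ∧ PySem.Chars.startswith (c :: t) kr.1.toList = true then kr.2 else b) b =
    if 0 < b ∧ pvP pvG0 (c :: t) then 0
    else if 1 < b ∧ pvP pvG1 (c :: t) then 1
    else if 2 < b ∧ pvP pvG2 (c :: t) then 2
    else b := by
  rw [pvKeywordRule_eq, List.foldl_append, List.foldl_append,
    pvGroup_step, pvGroup_step, pvGroup_step]
  cases p0 : pvP pvG0 (c :: t) <;>
  cases p1 : pvP pvG1 (c :: t) <;>
  cases p2 : pvP pvG2 (c :: t) <;>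
    simp only [p0, p1, p2, Bool.false_eq_true, and_false, and_true, eq_self_iff_true,
      if_false] <;>
    first | rfl | omega | (split_ifs <;> omega)

lemma pvQ_cons (g : List String) (c : Char) (t : List Char) :
    pvQ g (c :: t) = (pvP g (c :: t) || pvQ g t) := by
  induction g with
  | nil => rfl
  | cons k g ih =>
    simp only [pvQ, pvP, List.any_cons] at *
    rw [pvIsIn_cons]
    rw [Bool.eq_iff_iff] at ih ⊢
    simp only [Bool.or_eq_true] at ih ⊢
    tauto

lemma pvBest_eq (s : List Char) : ∀ b : Nat, pvBest s b =
    if 0 < b ∧ pvQ pvG0 s then 0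
    else if 1 < b ∧ pvQ pvG1 s then 1
    else if 2 < b ∧ pvQ pvG2 s then 2
    else b := by
  induction s with
  | nil =>
    intro b
    have h0 : pvQ pvG0 [] = false := by decide
    have h1 : pvQ pvG1 [] = false := by decide
    have h2 : pvQ pvG2 [] = false := by decide
    simp [pvBest, h0, h1, h2]
  | cons c t ih =>
    intro b
    rw [pvBest, pvStep_eq, ih, pvQ_cons, pvQ_cons, pvQ_cons]
    cases p0 : pvP pvG0 (c :: t) <;>
    cases p1 : pvP pvG1 (c :: t) <;>
    cases p2 : pvP pvG2 (c :: t) <;>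
    cases q0 : pvQ pvG0 t <;>
    cases q1 : pvQ pvG1 t <;>
    cases q2 : pvQ pvG2 t <;>
      simp only [p0, p1, p2, q0, q1, q2, Bool.false_or, Bool.true_or, Bool.or_false,
        Bool.or_true, Bool.false_eq_true, and_false, and_true,
        eq_self_iff_true, if_false] <;>
      first | rfl | omega | (split_ifs <;> omega)

-- ===== VERDICT (by name: the statement is the Claim_ definition above) =====
theorem parse_email_task_py_spec : Claim_equal_parse_email_task_py := by
  intro description _
  unfold Spec_parse_email_task_py parse_email_task_py parse_email_task_py_alt
  simp only [pvBest_eq, PySem.Str.isIn_eq, pvQ, pvG0, pvG1, pvG2, List.any_cons, List.any_nil,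
    Bool.or_false, Bool.or_eq_true]
  split_ifs <;> simp_all [pvResults, List.getD]
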